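-- pv_equiv track=rewrite | github.com/Suraj-S23/MAMBA-ORF-WIP | simple_baseline1.py | predict_orfs
-- ===== SOURCE A (Python) =====
-- def predict_orfs(sequence):
--     orfs = []
--     start_codon = "ATG"
--     stop_codons = ["TAA", "TAG", "TGA"]
--
--     in_orf = False
--     orf_start = 0
--
--     for i in range(len(sequence) - len(start_codon) + 1):
--         codon = sequence[i:i+len(start_codon)]
--
--         if codon == start_codon:
--             if not in_orf:
--                 in_orf = True
--                 orf_start = i
--         elif codon in stop_codons:
--             if in_orf:
--                 orfs.append((orf_start, i+len(start_codon)))  # Include the stop codon in the ORF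
--                 in_orf = False
--
--     return orfs
-- ===== SOURCE B (Python) =====
-- def predict_orfs(sequence):
--     orfs = []
--     pos = 0
--     while True:
--         start = sequence.find("ATG", pos)
--         if start == -1:
--             break
--         stops = [sequence.find(c, start) for c in ("TAA", "TAG", "TGA")]
--         stops = [x for x in stops if x != -1]
--         if not stops:
--             break
--         stop = min(stops)
--         orfs.append((start, stop + 3))
--         pos = stop + 1
--     return orfs
-- ===== Notes on version B (the rewrite author's own statement) =====
-- stated objective: alternative
-- what changed: Replaces A's index-by-index scan with an in_orf flag by a jump loop that uses str.find to locate the next 'ATG' and the earliest of the three stop codons, skipping directly past each ORF found.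
import Mathlib
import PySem

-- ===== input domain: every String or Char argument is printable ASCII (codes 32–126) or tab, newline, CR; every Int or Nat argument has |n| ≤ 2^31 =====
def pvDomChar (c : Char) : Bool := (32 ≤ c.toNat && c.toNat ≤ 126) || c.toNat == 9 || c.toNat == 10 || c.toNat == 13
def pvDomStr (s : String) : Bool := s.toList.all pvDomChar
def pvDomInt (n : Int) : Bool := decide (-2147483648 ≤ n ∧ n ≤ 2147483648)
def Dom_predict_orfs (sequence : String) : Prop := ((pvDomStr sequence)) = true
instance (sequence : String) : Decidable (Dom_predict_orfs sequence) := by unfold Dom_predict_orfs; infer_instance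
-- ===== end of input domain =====

-- B replaces A's index-by-index scan and in_orf flag with a find-based jump loop (alternative algorithm, same results).

-- ===== PORT A =====
def predict_orfs (sequence : String) : List (Int × Int) :=
  let start_codon : String := "ATG"
  let stop_codons : List String := ["TAA", "TAG", "TGA"]
  let final :=
    (PySem.List.pyRange 0 (PySem.Str.len sequence - PySem.Str.len start_codon + 1) 1).foldl
      (fun (st : List (Int × Int) × Bool × Int) (i : Int) =>
        match st with
        | (orfs, in_orf, orf_start) =>
          let codon := PySem.Str.slice sequence (some i) (some (i + PySem.Str.len start_codon))
          if codon = start_codon then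
            if !in_orf then (orfs, true, i) else (orfs, in_orf, orf_start)
          else if codon ∈ stop_codons then
            if in_orf then (orfs ++ [(orf_start, i + PySem.Str.len start_codon)], false, orf_start)
            else (orfs, in_orf, orf_start)
          else (orfs, in_orf, orf_start))
      ([], false, 0)
  final.1

-- ===== PORT B =====
-- the 'while True' loop of Source B; the fuel argument is only a termination guard
-- (each iteration moves pos past the stop it just found, so length+1 iterations always suffice)
def pvBLoop (sequence : String) (fuel : Nat) (pos : Int) (orfs : List (Int × Int)) :
    List (Int × Int) :=
  match fuel with
  | 0 => orfs
  | fuel + 1 =>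
    let start := PySem.Str.findFrom sequence "ATG" pos
    if start = -1 then orfs
    else
      let stops := (["TAA", "TAG", "TGA"].map
        (fun c => PySem.Str.findFrom sequence c start)).filter (fun x => x ≠ -1)
      match PySem.List.min? stops (fun x => x) with
      | none => orfs
      | some stop => pvBLoop sequence fuel (stop + 1) (orfs ++ [(start, stop + 3)])

def predict_orfs_alt (sequence : String) : List (Int × Int) :=
  pvBLoop sequence ((PySem.Str.len sequence).toNat + 1) 0 []

-- ===== PRECONDITION & SPEC =====
def Spec_predict_orfs (sequence : String) (out : List (Int × Int)) : Prop := out = predict_orfs_alt sequence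
instance (sequence : String) (out : List (Int × Int)) : Decidable (Spec_predict_orfs sequence out) := by unfold Spec_predict_orfs; infer_instance

-- ===== CLAIM (what is proved, stated in full; the proofs are below) =====
def Claim_equal_predict_orfs : Prop := ∀ (sequence : String), Dom_predict_orfs sequence → Spec_predict_orfs sequence (predict_orfs sequence)

-- ===== LEMMAS AND PROOFS =====

def pvATG : List Char := ['A', 'T', 'G']
def pvStops : List (List Char) := [['T', 'A', 'A'], ['T', 'A', 'G'], ['T', 'G', 'A']]

def pvCodon (cs : List Char) (p : Nat) : List Char := (cs.drop p).take 3

-- reference state machine: A's loop from index p, orf = some start when in_orf holds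
def pvScan (cs : List Char) (p : Nat) (orf : Option Nat) : List (Int × Int) :=
  if cs.length < p + 3 then []
  else if pvCodon cs p = pvATG then
    match orf with
    | none => pvScan cs (p + 1) (some p)
    | some u => pvScan cs (p + 1) (some u)
  else if pvCodon cs p ∈ pvStops then
    match orf with
    | some u => ((u : Int), (p : Int) + 3) :: pvScan cs (p + 1) none
    | none => pvScan cs (p + 1) none
  else pvScan cs (p + 1) orf
termination_by cs.length - p
decreasing_by all_goals omega

theorem pvScan_small (cs : List Char) (p : Nat) (orf : Option Nat)
    (h : cs.length < p + 3) : pvScan cs p orf = [] := by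
  rw [pvScan.eq_def, if_pos h]

theorem pvScan_atg_none (cs : List Char) (p : Nat) (h1 : ¬ cs.length < p + 3)
    (hA : pvCodon cs p = pvATG) : pvScan cs p none = pvScan cs (p + 1) (some p) := by
  rw [pvScan.eq_def, if_neg h1, if_pos hA]

theorem pvScan_atg_some (cs : List Char) (p u : Nat) (h1 : ¬ cs.length < p + 3)
    (hA : pvCodon cs p = pvATG) : pvScan cs p (some u) = pvScan cs (p + 1) (some u) := by
  rw [pvScan.eq_def, if_neg h1, if_pos hA]

theorem pvScan_stop_none (cs : List Char) (p : Nat) (h1 : ¬ cs.length < p + 3)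
    (hA : ¬ pvCodon cs p = pvATG) (hS : pvCodon cs p ∈ pvStops) :
    pvScan cs p none = pvScan cs (p + 1) none := by
  rw [pvScan.eq_def, if_neg h1, if_neg hA, if_pos hS]

theorem pvScan_stop_some (cs : List Char) (p u : Nat) (h1 : ¬ cs.length < p + 3)
    (hA : ¬ pvCodon cs p = pvATG) (hS : pvCodon cs p ∈ pvStops) :
    pvScan cs p (some u) = ((u : Int), (p : Int) + 3) :: pvScan cs (p + 1) none := by
  rw [pvScan.eq_def, if_neg h1, if_neg hA, if_pos hS]

theorem pvScan_other (cs : List Char) (p : Nat) (orf : Option Nat) (h1 : ¬ cs.length < p + 3)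
    (hA : ¬ pvCodon cs p = pvATG) (hS : ¬ pvCodon cs p ∈ pvStops) :
    pvScan cs p orf = pvScan cs (p + 1) orf := by
  rw [pvScan.eq_def, if_neg h1, if_neg hA, if_neg hS]

theorem pv_prefix3_le (cs c : List Char) (j : Nat) (hc : c.length = 3)
    (h : c <+: cs.drop j) : j + 3 ≤ cs.length := by
  have := h.length_le
  rw [List.length_drop, hc] at this
  omega

theorem pv_codon_iff (cs c : List Char) (p : Nat) (hc : c.length = 3)
    (_hlen : p + 3 ≤ cs.length) : pvCodon cs p = c ↔ c <+: cs.drop p := by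
  rw [List.prefix_iff_eq_take, hc, pvCodon]
  exact eq_comm

theorem pv_stop_len : ∀ c ∈ pvStops, c.length = 3 := by decide

theorem pv_prefix_drop_infix (cs x : List Char) (p j : Nat) (hpj : p ≤ j)
    (h : x <+: cs.drop j) : x <:+: cs.drop p := by
  have hd : cs.drop j = (cs.drop p).drop (j - p) := by
    rw [List.drop_drop]; congr 1; omega
  rw [hd] at h
  obtain ⟨r, hr⟩ := h
  obtain ⟨w, hw⟩ := List.drop_suffix (j - p) (cs.drop p)
  refine ⟨w, r, ?_⟩
  rw [← hr] at hw
  calc w ++ x ++ r = w ++ (x ++ r) := by rw [List.append_assoc]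
    _ = cs.drop p := hw

theorem pv_scan_nil_of_no_ATG (cs : List Char) (p : Nat)
    (h : ∀ j, p ≤ j → ¬ pvATG <+: cs.drop j) :
    pvScan cs p none = [] := by
  suffices H : ∀ k p, cs.length ≤ p + k + 2 → (∀ j, p ≤ j → ¬ pvATG <+: cs.drop j) →
      pvScan cs p none = [] from H cs.length p (by omega) h
  intro k
  induction k with
  | zero => intro p hk _; exact pvScan_small cs p none (by omega)
  | succ k ih =>
    intro p hk h
    by_cases hlen : cs.length < p + 3
    · exact pvScan_small cs p none hlen
    · have hA : ¬ pvCodon cs p = pvATG := fun he =>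
        h p le_rfl ((pv_codon_iff cs pvATG p (by decide) (by omega)).mp he)
      by_cases hS : pvCodon cs p ∈ pvStops
      · rw [pvScan_stop_none cs p hlen hA hS]
        exact ih (p + 1) (by omega) (fun j hj => h j (by omega))
      · rw [pvScan_other cs p none hlen hA hS]
        exact ih (p + 1) (by omega) (fun j hj => h j (by omega))

theorem pv_scan_skip_none (cs : List Char) (p q : Nat) (hpq : p ≤ q)
    (h : ∀ j, p ≤ j → j < q → ¬ pvATG <+: cs.drop j) :
    pvScan cs p none = pvScan cs q none := by
  suffices H : ∀ k p, p ≤ q → q ≤ p + k →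
      (∀ j, p ≤ j → j < q → ¬ pvATG <+: cs.drop j) →
      pvScan cs p none = pvScan cs q none from H q p hpq (by omega) h
  intro k
  induction k with
  | zero =>
    intro p h1 h2 _
    have : p = q := by omega
    subst this; rfl
  | succ k ih =>
    intro p h1 h2 h
    rcases eq_or_lt_of_le h1 with rfl | hlt
    · rfl
    · by_cases hlen : cs.length < p + 3
      · rw [pvScan_small cs p none hlen, pvScan_small cs q none (by omega)]
      · have hA : ¬ pvCodon cs p = pvATG := fun he =>
          h p le_rfl hlt ((pv_codon_iff cs pvATG p (by decide) (by omega)).mp he)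
        have hrec := ih (p + 1) hlt (by omega) (fun j hj1 hj2 => h j (by omega) hj2)
        by_cases hS : pvCodon cs p ∈ pvStops
        · rw [pvScan_stop_none cs p hlen hA hS]; exact hrec
        · rw [pvScan_other cs p none hlen hA hS]; exact hrec

theorem pv_scan_nil_of_no_stop (cs : List Char) (p u : Nat)
    (h : ∀ j, p ≤ j → ∀ c ∈ pvStops, ¬ c <+: cs.drop j) :
    pvScan cs p (some u) = [] := by
  suffices H : ∀ k p, cs.length ≤ p + k + 2 →
      (∀ j, p ≤ j → ∀ c ∈ pvStops, ¬ c <+: cs.drop j) →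
      pvScan cs p (some u) = [] from H cs.length p (by omega) h
  intro k
  induction k with
  | zero => intro p hk _; exact pvScan_small cs p (some u) (by omega)
  | succ k ih =>
    intro p hk h
    by_cases hlen : cs.length < p + 3
    · exact pvScan_small cs p (some u) hlen
    · have hS : ¬ pvCodon cs p ∈ pvStops := fun hm =>
        h p le_rfl _ hm ((pv_codon_iff cs _ p (pv_stop_len _ hm) (by omega)).mp rfl)
      have hrec := ih (p + 1) (by omega) (fun j hj => h j (by omega))
      by_cases hA : pvCodon cs p = pvATG
      · rw [pvScan_atg_some cs p u hlen hA]; exact hrec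
      · rw [pvScan_other cs p (some u) hlen hA hS]; exact hrec

theorem pv_scan_skip_orf (cs : List Char) (p q u : Nat) (hpq : p ≤ q)
    (h : ∀ j, p ≤ j → j < q → ∀ c ∈ pvStops, ¬ c <+: cs.drop j) :
    pvScan cs p (some u) = pvScan cs q (some u) := by
  suffices H : ∀ k p, p ≤ q → q ≤ p + k →
      (∀ j, p ≤ j → j < q → ∀ c ∈ pvStops, ¬ c <+: cs.drop j) →
      pvScan cs p (some u) = pvScan cs q (some u) from H q p hpq (by omega) h
  intro k
  induction k with
  | zero =>
    intro p h1 h2 _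
    have : p = q := by omega
    subst this; rfl
  | succ k ih =>
    intro p h1 h2 h
    rcases eq_or_lt_of_le h1 with rfl | hlt
    · rfl
    · by_cases hlen : cs.length < p + 3
      · rw [pvScan_small cs p (some u) hlen, pvScan_small cs q (some u) (by omega)]
      · have hS : ¬ pvCodon cs p ∈ pvStops := fun hm =>
          h p le_rfl hlt _ hm ((pv_codon_iff cs _ p (pv_stop_len _ hm) (by omega)).mp rfl)
        have hrec := ih (p + 1) hlt (by omega) (fun j hj1 hj2 => h j (by omega) hj2)
        by_cases hA : pvCodon cs p = pvATG
        · rw [pvScan_atg_some cs p u hlen hA]; exact hrec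
        · rw [pvScan_other cs p (some u) hlen hA hS]; exact hrec

theorem pv_toList_ATG : "ATG".toList = pvATG := by decide
theorem pv_toList_TAA : "TAA".toList = ['T', 'A', 'A'] := by decide
theorem pv_toList_TAG : "TAG".toList = ['T', 'A', 'G'] := by decide
theorem pv_toList_TGA : "TGA".toList = ['T', 'G', 'A'] := by decide

theorem pv_foldA (s : String) (m p : Nat) (acc : List (Int × Int)) (orf : Option Nat) (st : Int)
    (hm : s.toList.length ≤ p + m + 2) :
    ((PySem.List.pyRange (p : Int) ((s.toList.length : Int) - 2) 1).foldl
      (fun (st : List (Int × Int) × Bool × Int) (i : Int) =>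
        match st with
        | (orfs, in_orf, orf_start) =>
          let codon := PySem.Str.slice s (some i) (some (i + PySem.Str.len "ATG"))
          if codon = "ATG" then
            if !in_orf then (orfs, true, i) else (orfs, in_orf, orf_start)
          else if codon ∈ ["TAA", "TAG", "TGA"] then
            if in_orf then (orfs ++ [(orf_start, i + PySem.Str.len "ATG")], false, orf_start)
            else (orfs, in_orf, orf_start)
          else (orfs, in_orf, orf_start))
      (acc, orf.isSome, (match orf with | some u => (u : Int) | none => st))).1
    = acc ++ pvScan s.toList p orf := by
  set f := (fun (st : List (Int × Int) × Bool × Int) (i : Int) =>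
        match st with
        | (orfs, in_orf, orf_start) =>
          let codon := PySem.Str.slice s (some i) (some (i + PySem.Str.len "ATG"))
          if codon = "ATG" then
            if !in_orf then (orfs, true, i) else (orfs, in_orf, orf_start)
          else if codon ∈ ["TAA", "TAG", "TGA"] then
            if in_orf then (orfs ++ [(orf_start, i + PySem.Str.len "ATG")], false, orf_start)
            else (orfs, in_orf, orf_start)
          else (orfs, in_orf, orf_start)) with hf
  induction m generalizing p acc orf st with
  | zero =>
    rw [PySem.List.pyRange_one_eq_nil (by omega), List.foldl_nil,
      pvScan_small s.toList p orf (by omega)]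
    simp
  | succ m ih =>
    by_cases hsmall : s.toList.length ≤ p + 2
    · rw [PySem.List.pyRange_one_eq_nil (by omega), List.foldl_nil,
        pvScan_small s.toList p orf (by omega)]
      simp
    · have hbig : p + 3 ≤ s.toList.length := by omega
      have hlen3 : PySem.Str.len "ATG" = 3 := by decide
      have hslice : (PySem.Str.slice s (some (p : Int)) (some ((p : Int) + PySem.Str.len "ATG"))).toList
          = pvCodon s.toList p := by
        rw [hlen3, show ((3 : Int) = ((3 : Nat) : Int)) from rfl, PySem.Str.toList_slice,
          PySem.Chars.slice_eq_listSlice, PySem.List.slice_natCast_add]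
        rfl
      have hc1 : (PySem.Str.slice s (some (p : Int)) (some ((p : Int) + PySem.Str.len "ATG")) = "ATG")
          ↔ pvCodon s.toList p = pvATG := by
        rw [← String.toList_inj, hslice, pv_toList_ATG]
      have hc2 : (PySem.Str.slice s (some (p : Int)) (some ((p : Int) + PySem.Str.len "ATG"))
            ∈ (["TAA", "TAG", "TGA"] : List String))
          ↔ pvCodon s.toList p ∈ pvStops := by
        simp only [List.mem_cons, List.not_mem_nil, or_false, ← String.toList_inj, hslice]
        simp [pvStops, pv_toList_TAA, pv_toList_TAG, pv_toList_TGA]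
      have hcast : ((p : Int) + 1) = ((p + 1 : Nat) : Int) := by push_cast; ring
      rcases orf with _ | u
      · show (List.foldl f (acc, false, st)
            (PySem.List.pyRange (p : Int) ((s.toList.length : Int) - 2) 1)).1
          = acc ++ pvScan s.toList p none
        rw [PySem.List.pyRange_one_cons (show (p : Int) < (s.toList.length : Int) - 2 by omega),
          List.foldl_cons]
        by_cases hA : pvCodon s.toList p = pvATG
        · have hstep : f (acc, false, st) (p : Int) = (acc, true, (p : Int)) := by
            rw [hf]; dsimp only; rw [if_pos (hc1.mpr hA)]; simp
          rw [hstep, hcast, pvScan_atg_none s.toList p (by omega) hA]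
          exact ih (p + 1) acc (some p) st (by omega)
        · by_cases hS : pvCodon s.toList p ∈ pvStops
          · have hstep : f (acc, false, st) (p : Int) = (acc, false, st) := by
              rw [hf]; dsimp only
              rw [if_neg (fun hh => hA (hc1.mp hh)), if_pos (hc2.mpr hS)]; simp
            rw [hstep, hcast, pvScan_stop_none s.toList p (by omega) hA hS]
            exact ih (p + 1) acc none st (by omega)
          · have hstep : f (acc, false, st) (p : Int) = (acc, false, st) := by
              rw [hf]; dsimp only
              rw [if_neg (fun hh => hA (hc1.mp hh)), if_neg (fun hh => hS (hc2.mp hh))]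
            rw [hstep, hcast, pvScan_other s.toList p none (by omega) hA hS]
            exact ih (p + 1) acc none st (by omega)
      · show (List.foldl f (acc, true, (u : Int))
            (PySem.List.pyRange (p : Int) ((s.toList.length : Int) - 2) 1)).1
          = acc ++ pvScan s.toList p (some u)
        rw [PySem.List.pyRange_one_cons (show (p : Int) < (s.toList.length : Int) - 2 by omega),
          List.foldl_cons]
        by_cases hA : pvCodon s.toList p = pvATG
        · have hstep : f (acc, true, (u : Int)) (p : Int) = (acc, true, (u : Int)) := by
            rw [hf]; dsimp only; rw [if_pos (hc1.mpr hA)]; simp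
          rw [hstep, hcast, pvScan_atg_some s.toList p u (by omega) hA]
          exact ih (p + 1) acc (some u) st (by omega)
        · by_cases hS : pvCodon s.toList p ∈ pvStops
          · have hstep : f (acc, true, (u : Int)) (p : Int)
                = (acc ++ [((u : Int), (p : Int) + PySem.Str.len "ATG")], false, (u : Int)) := by
              rw [hf]; dsimp only
              rw [if_neg (fun hh => hA (hc1.mp hh)), if_pos (hc2.mpr hS)]; simp
            rw [hstep, hlen3, hcast, pvScan_stop_some s.toList p u (by omega) hA hS]
            rw [show acc ++ (((u : Int), (p : Int) + 3) :: pvScan s.toList (p + 1) none)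
                = (acc ++ [((u : Int), (p : Int) + 3)]) ++ pvScan s.toList (p + 1) none from by simp]
            exact ih (p + 1) (acc ++ [((u : Int), (p : Int) + 3)]) none (u : Int) (by omega)
          · have hstep : f (acc, true, (u : Int)) (p : Int) = (acc, true, (u : Int)) := by
              rw [hf]; dsimp only
              rw [if_neg (fun hh => hA (hc1.mp hh)), if_neg (fun hh => hS (hc2.mp hh))]
            rw [hstep, hcast, pvScan_other s.toList p (some u) (by omega) hA hS]
            exact ih (p + 1) acc (some u) st (by omega)

theorem pv_foldB (s : String) (m p : Nat) (hp : p ≤ s.toList.length)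
    (hm : s.toList.length + 1 ≤ p + m) (orfs : List (Int × Int)) :
    pvBLoop s m (p : Int) orfs = orfs ++ pvScan s.toList p none := by
  induction m generalizing p orfs with
  | zero => exact absurd hm (by omega)
  | succ m ih =>
    rw [pvBLoop.eq_def]
    dsimp only
    simp only [PySem.Str.findFrom_eq, pv_toList_ATG, pv_toList_TAA, pv_toList_TAG, pv_toList_TGA,
      List.map_cons, List.map_nil]
    by_cases hfind : PySem.Chars.findFrom s.toList pvATG (p : Int) none = -1
    · rw [if_pos hfind]
      have hni := (PySem.Chars.findFrom_natCast_eq_neg_one_iff s.toList pvATG p hp).mp hfind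
      rw [pv_scan_nil_of_no_ATG s.toList p
        (fun j hj hpre => hni (pv_prefix_drop_infix s.toList pvATG p j hj hpre)),
        List.append_nil]
    · rw [if_neg hfind]
      obtain ⟨hle, hpre, hminA⟩ :=
        PySem.Chars.findFrom_natCast_spec s.toList pvATG p hp hfind
      set F := PySem.Chars.findFrom s.toList pvATG (p : Int) none with hF
      have hFnn : (0 : Int) ≤ F := le_trans (Int.natCast_nonneg p) hle
      set fn := F.toNat with hfn
      have hFcast : F = (fn : Int) := (Int.toNat_of_nonneg hFnn).symm
      have hpfn : p ≤ fn := by omega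
      have hfn3 : fn + 3 ≤ s.toList.length := pv_prefix3_le s.toList pvATG fn (by decide) hpre
      have hfnlen : fn ≤ s.toList.length := by omega
      have hcodF : pvCodon s.toList fn = pvATG :=
        (pv_codon_iff s.toList pvATG fn (by decide) hfn3).mpr hpre
      rw [pv_scan_skip_none s.toList p fn hpfn (fun j h1 h2 => hminA j h1 (by omega)),
        pvScan_atg_none s.toList fn (by omega) hcodF, hFcast]
      rcases hmq : PySem.List.min?
          (([PySem.Chars.findFrom s.toList ['T', 'A', 'A'] (fn : Int) none,
             PySem.Chars.findFrom s.toList ['T', 'A', 'G'] (fn : Int) none,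
             PySem.Chars.findFrom s.toList ['T', 'G', 'A'] (fn : Int) none]).filter
            (fun x => x ≠ -1)) (fun x => x) with _ | g
      · rw [hmq]
        have hnil := (PySem.List.min?_eq_none_iff _ _).mp hmq
        rw [List.filter_eq_nil_iff] at hnil
        simp only [List.mem_cons, List.not_mem_nil, or_false, decide_not, Bool.not_eq_true',
          decide_eq_false_iff_not, not_not] at hnil
        have hall : ∀ c ∈ pvStops, PySem.Chars.findFrom s.toList c (fn : Int) none = -1 := by
          intro c hc
          simp only [pvStops, List.mem_cons, List.not_mem_nil, or_false] at hc
          rcases hc with rfl | rfl | rfl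
          · exact hnil _ (Or.inl rfl)
          · exact hnil _ (Or.inr (Or.inl rfl))
          · exact hnil _ (Or.inr (Or.inr rfl))
        rw [pv_scan_nil_of_no_stop s.toList (fn + 1) fn (fun j hj c hc hpre' =>
            (PySem.Chars.findFrom_natCast_eq_neg_one_iff s.toList c fn hfnlen).mp (hall c hc)
              (pv_prefix_drop_infix s.toList c fn j (by omega) hpre')),
          List.append_nil]
      · rw [hmq]
        dsimp only
        have hgmem := PySem.List.min?_mem hmq
        have hgmin := PySem.List.min?_isMin hmq
        rw [List.mem_filter] at hgmem
        obtain ⟨hgin, hgne'⟩ := hgmem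
        have hgne : g ≠ -1 := by simpa using hgne'
        -- identify the stop codon c0 whose find produced g
        have hex : ∃ c0, c0 ∈ pvStops ∧ g = PySem.Chars.findFrom s.toList c0 (fn : Int) none := by
          simp only [List.mem_cons, List.not_mem_nil, or_false] at hgin
          rcases hgin with rfl | rfl | rfl
          · exact ⟨['T','A','A'], by decide, rfl⟩
          · exact ⟨['T','A','G'], by decide, rfl⟩
          · exact ⟨['T','G','A'], by decide, rfl⟩
        obtain ⟨c0, hc0mem, hc0⟩ := hex
        obtain ⟨hgle, hgpre, hgminc⟩ :=
          PySem.Chars.findFrom_natCast_spec s.toList c0 fn hfnlen (hc0 ▸ hgne)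
        rw [← hc0] at hgle hgpre hgminc
        have hgnn : (0 : Int) ≤ g := le_trans (Int.natCast_nonneg fn) hgle
        set gN := g.toNat with hgN
        have hgcast : g = (gN : Int) := (Int.toNat_of_nonneg hgnn).symm
        have hfngN : fn ≤ gN := by omega
        have hgN3 : gN + 3 ≤ s.toList.length :=
          pv_prefix3_le s.toList c0 gN (pv_stop_len c0 hc0mem) hgpre
        have hcodg : pvCodon s.toList gN ∈ pvStops := by
          rw [(pv_codon_iff s.toList c0 gN (pv_stop_len c0 hc0mem) hgN3).mpr hgpre]
          exact hc0mem
        have hgNfn : fn + 1 ≤ gN := by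
          rcases Nat.lt_or_ge fn gN with hlt | hge
          · omega
          · exfalso
            have heq : gN = fn := by omega
            rw [heq, hcodF] at hcodg
            exact absurd hcodg (by decide)
        have hne_atg : ¬ pvCodon s.toList gN = pvATG := by
          intro he; rw [he] at hcodg; exact absurd hcodg (by decide)
        have hnostop : ∀ j, fn + 1 ≤ j → j < gN → ∀ c ∈ pvStops, ¬ c <+: s.toList.drop j := by
          intro j hj1 hj2 c hc hpre'
          have hcne : PySem.Chars.findFrom s.toList c (fn : Int) none ≠ -1 := by
            intro hz
            exact (PySem.Chars.findFrom_natCast_eq_neg_one_iff s.toList c fn hfnlen).mp hz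
              (pv_prefix_drop_infix s.toList c fn j (by omega) hpre')
          obtain ⟨hcle, _, hcminc⟩ :=
            PySem.Chars.findFrom_natCast_spec s.toList c fn hfnlen hcne
          have hcj : (PySem.Chars.findFrom s.toList c (fn : Int) none).toNat ≤ j := by
            by_contra hcontra
            exact hcminc j (by omega) (by omega) hpre'
          have hcmemS : PySem.Chars.findFrom s.toList c (fn : Int) none ∈
              (([PySem.Chars.findFrom s.toList ['T', 'A', 'A'] (fn : Int) none,
                 PySem.Chars.findFrom s.toList ['T', 'A', 'G'] (fn : Int) none,
                 PySem.Chars.findFrom s.toList ['T', 'G', 'A'] (fn : Int) none]).filter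
                (fun x => x ≠ -1)) := by
            rw [List.mem_filter]
            constructor
            · simp only [pvStops, List.mem_cons, List.not_mem_nil, or_false] at hc
              rcases hc with rfl | rfl | rfl
              · exact List.mem_cons_self
              · exact List.mem_cons_of_mem _ List.mem_cons_self
              · exact List.mem_cons_of_mem _ (List.mem_cons_of_mem _ List.mem_cons_self)
            · simpa using hcne
          have hgle' := hgmin _ hcmemS
          have hcnn : (0 : Int) ≤ PySem.Chars.findFrom s.toList c (fn : Int) none :=
            le_trans (Int.natCast_nonneg fn) hcle
          omega
        rw [pv_scan_skip_orf s.toList (fn + 1) gN fn hgNfn hnostop,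
          pvScan_stop_some s.toList gN fn (by omega) hne_atg hcodg, hgcast,
          show ((gN : Int) + 1) = ((gN + 1 : Nat) : Int) by push_cast; ring]
        rw [show orfs ++ (((fn : Int), ((gN : Nat) : Int) + 3) :: pvScan s.toList (gN + 1) none)
            = (orfs ++ [((fn : Int), ((gN : Nat) : Int) + 3)]) ++ pvScan s.toList (gN + 1) none
            from by simp]
        exact ih (gN + 1) (by omega) (by omega) (orfs ++ [((fn : Int), ((gN : Nat) : Int) + 3)])

-- ===== VERDICT (by name: the statement is the Claim_ definition above) =====
theorem predict_orfs_spec : Claim_equal_predict_orfs := by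
  intro s _
  unfold Spec_predict_orfs predict_orfs predict_orfs_alt
  dsimp only
  have hlen3 : PySem.Str.len "ATG" = 3 := by decide
  have hrange : PySem.Str.len s - PySem.Str.len "ATG" + 1 = ((s.toList.length : Int) - 2) := by
    rw [PySem.Str.len_eq, hlen3]; ring
  rw [hrange]
  have hA := pv_foldA s s.toList.length 0 [] none 0 (by omega)
  simp only [Nat.cast_zero] at hA
  have hfuel : (PySem.Str.len s).toNat + 1 = s.toList.length + 1 := by
    rw [PySem.Str.len_eq]; simp
  have hB := pv_foldB s (s.toList.length + 1) 0 (by omega) (by omega) []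
  simp only [Nat.cast_zero] at hB
  rw [hfuel, hB]
  exact hA
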